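-- pv_equiv track=rewrite | github.com/YooKyungHun/Algorithm | ALGORITHM/Python/귤고르기.py | solution
-- ===== SOURCE A (Python) =====
-- from collections import Counter
--
-- def solution(k, tangerine):
--     # [1, 3, 2, 5, 4, 5, 2, 3]
--
--     # count = Counter(tangerine)
--     # {"1":1,"2":2,"3":2,"4":1,"5":2}
--
--     # count = sorted(Counter(tangerine).values())
--     # [1,1,2,2,2]
--
--     # count = sorted(Counter(tangerine).items())
--     # [[1,1],[2,2],[3,2],[4,1],[5,2]]
--
--     count = Counter(tangerine).most_common()
--     # [[3,2],[2,2],[5,2],[1,1],[4,1]]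
--
--     # count = sorted(Counter(tangerine).items(), reverse=True, key=lambda x: x[1])
--     # [[3,2],[2,2],[5,2],[1,1],[4,1]]
--
--     answer = 0
--     for i, cnt in count:
--         if k <= 0:
--             break
--         k -= cnt
--         answer += 1
--
--     return answer
-- ===== SOURCE B (Python) =====
-- def solution(k, tangerine):
--     # Count how many of each tangerine size, then bucket the sizes by frequency
--     # (frequencies are bounded by len(tangerine)) and walk frequencies from
--     # highest to lowest: a counting-sort organisation instead of a comparison sort.
--     freq = {}
--     for t in tangerine:
--         freq[t] = freq.get(t, 0) + 1
--     buckets = {}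
--     for c in freq.values():
--         buckets[c] = buckets.get(c, 0) + 1
--     answer = 0
--     for f in range(len(tangerine), 0, -1):
--         for _ in range(buckets.get(f, 0)):
--             if k <= 0:
--                 return answer
--             k -= f
--             answer += 1
--     return answer
-- ===== Notes on version B (the rewrite author's own statement) =====
-- stated objective: alternative
-- what changed: Replaces Counter(...).most_common()'s comparison sort of (type,count) pairs by a counting-sort style frequency-bucket dict scanned from the highest possible frequency down, with early return inside the bucket walk; asymptotically O(n) but not measurably faster in CPython, where Counter/sort run in C.
import Mathlib
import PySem

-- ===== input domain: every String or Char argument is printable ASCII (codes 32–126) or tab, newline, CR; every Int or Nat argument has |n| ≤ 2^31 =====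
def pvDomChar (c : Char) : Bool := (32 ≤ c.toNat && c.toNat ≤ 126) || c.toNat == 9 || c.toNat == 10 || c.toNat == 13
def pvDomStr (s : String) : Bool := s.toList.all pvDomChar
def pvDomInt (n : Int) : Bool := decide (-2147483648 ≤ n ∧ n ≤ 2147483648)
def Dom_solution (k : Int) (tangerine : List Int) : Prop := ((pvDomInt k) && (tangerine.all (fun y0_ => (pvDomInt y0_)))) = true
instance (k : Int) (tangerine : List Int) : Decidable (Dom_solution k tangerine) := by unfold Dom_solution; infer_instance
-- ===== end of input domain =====

-- B replaces the comparison sort behind Counter.most_common() by a frequency-bucket dict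
-- scanned from the highest possible frequency down (counting-sort idea); objective: alternative.

-- ===== PORT A =====
-- 'for i, cnt in count: if k <= 0: break; k -= cnt; answer += 1'
def pvALoop : List (Int × Int) → Int → Int → Int
  | [], _, answer => answer
  | (_, cnt) :: rest, k, answer =>
    if k ≤ 0 then answer else pvALoop rest (k - cnt) (answer + 1)

def solution (k : Int) (tangerine : List Int) : Int :=
  -- Counter(tangerine).most_common() = sorted(Counter(tangerine).items(), key=lambda x: x[1], reverse=True)
  let count := PySem.List.sorted (PySem.Dict.counter tangerine).items (fun p => p.2) true
  pvALoop count k 0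

-- ===== PORT B =====
-- inner loop 'for _ in range(buckets.get(f, 0)): if k <= 0: return answer; k -= f; answer += 1'
-- (.inl = early return with the answer, .inr = loop finished with the new state)
def pvBInner (f : Int) : Nat → Int → Int → Int ⊕ (Int × Int)
  | 0, k, answer => .inr (k, answer)
  | m + 1, k, answer =>
    if k ≤ 0 then .inl answer else pvBInner f m (k - f) (answer + 1)

-- outer loop 'for f in range(len(tangerine), 0, -1): …', f counted down as fuel+1
def pvBOuter (buckets : PySem.Dict Int Int) : Nat → Int → Int → Int
  | 0, _, answer => answer
  | f + 1, k, answer =>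
    match pvBInner ((f : Int) + 1) ((buckets.getD ((f : Int) + 1) 0).toNat) k answer with
    | .inl a => a
    | .inr (k', a') => pvBOuter buckets f k' a'

def solution_alt (k : Int) (tangerine : List Int) : Int :=
  let freq := tangerine.foldl (fun d x => d.insert x (d.getD x 0 + 1)) PySem.Dict.empty
  let buckets := freq.values.foldl (fun d c => d.insert c (d.getD c 0 + 1)) PySem.Dict.empty
  pvBOuter buckets tangerine.length k 0

-- ===== PRECONDITION & SPEC =====
def Spec_solution (k : Int) (tangerine : List Int) (out : Int) : Prop := out = solution_alt k tangerine
instance (k : Int) (tangerine : List Int) (out : Int) : Decidable (Spec_solution k tangerine out) := by unfold Spec_solution; infer_instance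

-- ===== CLAIM (what is proved, stated in full; the proofs are below) =====
def Claim_equal_solution : Prop := ∀ (k : Int) (tangerine : List Int), Dom_solution k tangerine → Spec_solution k tangerine (solution k tangerine)

-- ===== LEMMAS AND PROOFS =====

-- the common greedy core: both loops consume a list of counts, stopping once k ≤ 0
def pvGreedy : List Int → Int → Int → Int
  | [], _, answer => answer
  | c :: rest, k, answer => if k ≤ 0 then answer else pvGreedy rest (k - c) (answer + 1)

-- the list of counts B's nested loops walk: replicate (count of f) f, for f = n, …, 1
def pvFlat (vs : List Int) : Nat → List Int
  | 0 => []
  | f + 1 => List.replicate (vs.count ((f : Int) + 1)) ((f : Int) + 1) ++ pvFlat vs f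

theorem pvALoop_eq_greedy (pairs : List (Int × Int)) (k a : Int) :
    pvALoop pairs k a = pvGreedy (pairs.map Prod.snd) k a := by
  induction pairs generalizing k a with
  | nil => rfl
  | cons p rest ih =>
    obtain ⟨i, c⟩ := p
    simp only [pvALoop, pvGreedy, List.map]
    split_ifs with h
    · rfl
    · exact ih _ _

theorem pvBInner_eq_greedy (f : Int) (m : Nat) (t : List Int) (k a : Int) :
    pvGreedy (List.replicate m f ++ t) k a =
      (match pvBInner f m k a with
       | .inl a' => a'
       | .inr (k', a') => pvGreedy t k' a') := by
  induction m generalizing k a with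
  | zero => rfl
  | succ m ih =>
    simp only [List.replicate_succ, List.cons_append, pvGreedy, pvBInner]
    split_ifs with h
    · rfl
    · exact ih _ _

theorem pvBOuter_eq_greedy (vs : List Int) (f : Nat) (k a : Int) :
    pvBOuter (PySem.Dict.counter vs) f k a = pvGreedy (pvFlat vs f) k a := by
  induction f generalizing k a with
  | zero => rfl
  | succ f ih =>
    simp only [pvBOuter, pvFlat, PySem.Dict.getD_counter, Int.toNat_natCast]
    rw [pvBInner_eq_greedy]
    cases pvBInner ((f : Int) + 1) (vs.count ((f : Int) + 1)) k a with
    | inl a' => rfl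
    | inr p => exact ih _ _

theorem pvFlat_count (vs : List Int) (f : Nat) (x : Int) :
    (pvFlat vs f).count x = if 1 ≤ x ∧ x ≤ (f : Int) then vs.count x else 0 := by
  induction f with
  | zero =>
    simp only [pvFlat, List.count_nil]
    split_ifs with h
    · omega
    · rfl
  | succ f ih =>
    simp only [pvFlat, List.count_append, List.count_replicate, ih]
    by_cases hx : x = (f : Int) + 1
    · subst hx
      have h2 : (1 : Int) ≤ (f : Int) + 1 ∧ (f : Int) + 1 ≤ ((f + 1 : Nat) : Int) := by push_cast; omega
      simp [h2]
    · have hne : ((f : Int) + 1 == x) = false := by simpa using fun h => hx h.symm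
      have hiff : ((1 : Int) ≤ x ∧ x ≤ (f : Int)) ↔ ((1 : Int) ≤ x ∧ x ≤ ((f + 1 : Nat) : Int)) := by
        push_cast; omega
      rw [hne, if_congr hiff rfl rfl]
      simp

theorem pvFlat_bounds_pairwise (vs : List Int) (f : Nat) :
    (∀ x ∈ pvFlat vs f, 1 ≤ x ∧ x ≤ (f : Int)) ∧
      (pvFlat vs f).Pairwise (fun a b => b ≤ a) := by
  induction f with
  | zero => simp [pvFlat]
  | succ f ih =>
    obtain ⟨hb, hp⟩ := ih
    simp only [pvFlat]
    constructor
    · intro x hx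
      rcases List.mem_append.mp hx with h | h
      · have := List.eq_of_mem_replicate h
        subst this; push_cast; omega
      · have := hb x h
        push_cast; omega
    · rw [List.pairwise_append]
      refine ⟨List.pairwise_replicate.mpr (Or.inr le_rfl), hp, ?_⟩
      intro a ha b hbm
      have hae := List.eq_of_mem_replicate ha
      have := hb b hbm
      omega

theorem pvFlat_perm (vs : List Int) (n : Nat)
    (hb : ∀ v ∈ vs, 1 ≤ v ∧ v ≤ (n : Int)) : (pvFlat vs n).Perm vs := by
  rw [List.perm_iff_count]
  intro x
  rw [pvFlat_count]
  split_ifs with h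
  · rfl
  · symm
    rw [List.count_eq_zero]
    intro hx
    exact h (hb x hx)

theorem pvCounter_values_bounds (t : List Int) :
    ∀ v ∈ (PySem.Dict.counter t).values, 1 ≤ v ∧ v ≤ (t.length : Int) := by
  intro v hv
  have : (PySem.Dict.counter t).values
      = ((PySem.Set.ofList t).map (fun k => (k, (t.count k : Int)))).map Prod.snd := by
    simp only [PySem.Dict.values, PySem.Dict.items_counter]
  rw [this, List.map_map] at hv
  obtain ⟨c, hc, hveq⟩ := List.mem_map.mp hv
  simp only [Function.comp_apply] at hveq
  subst hveq
  have hct : c ∈ t := (PySem.Set.mem_ofList _ _).mp hc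
  have h1 : 1 ≤ t.count c := List.count_pos_iff.mpr hct
  have h2 : t.count c ≤ t.length := List.count_le_length
  constructor <;> [exact_mod_cast h1; exact_mod_cast h2]

theorem pvCountLists_eq (t : List Int) :
    ((PySem.List.sorted (PySem.Dict.counter t).items (fun p => p.2) true).map Prod.snd)
      = pvFlat ((PySem.Dict.counter t).values) t.length := by
  set vs := (PySem.Dict.counter t).values with hvs
  have hperm1 : ((PySem.List.sorted (PySem.Dict.counter t).items (fun p => p.2) true).map Prod.snd).Perm vs := by
    have := PySem.List.sorted_perm (PySem.Dict.counter t).items (fun p => p.2) true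
    simpa [hvs, PySem.Dict.values] using this.map Prod.snd
  have hperm2 : (pvFlat vs t.length).Perm vs :=
    pvFlat_perm vs t.length (pvCounter_values_bounds t)
  have hp1 : ((PySem.List.sorted (PySem.Dict.counter t).items (fun p => p.2) true).map Prod.snd).Pairwise
      (fun a b => b ≤ a) := by
    rw [List.pairwise_map]
    exact PySem.List.sorted_pairwise_rev (PySem.Dict.counter t).items (fun p => p.2)
  have hp2 : (pvFlat vs t.length).Pairwise (fun a b => b ≤ a) :=
    (pvFlat_bounds_pairwise vs t.length).2
  exact List.Perm.eq_of_pairwise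
    (fun a b _ _ h1 h2 => le_antisymm h2 h1) hp1 hp2 (hperm1.trans hperm2.symm)

-- ===== VERDICT (by name: the statement is the Claim_ definition above) =====
theorem solution_spec : Claim_equal_solution := by
  intro k t _
  unfold Spec_solution solution solution_alt
  simp only [PySem.Dict.foldl_insert_getD_add_one_eq_counter]
  rw [pvALoop_eq_greedy, pvBOuter_eq_greedy, pvCountLists_eq]
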